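-- pv_equiv track=rewrite | github.com/paw309/Hamiltonian-Knights | lookahead_3ply.py | heuristic_lookahead3
-- ===== SOURCE A (Python) =====
-- BOARD_SIZE = 8
--
-- KNIGHT_MOVES = [
--     (1, 2), (2, 1), (-1, 2), (-2, 1),
--     (1, -2), (2, -1), (-1, -2), (-2, -1)
-- ]
--
-- def is_valid_square(r, c):
--     return 0 <= r < BOARD_SIZE and 0 <= c < BOARD_SIZE
--
-- def segments_cross(seg1, seg2):
--     def ccw(A,B,C):
--         return (C[1]-A[1])*(B[0]-A[0]) > (B[1]-A[1])*(C[0]-A[0])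
--     A, B = (seg1[0],seg1[1]), (seg1[2],seg1[3])
--     C, D = (seg2[0],seg2[1]), (seg2[2],seg2[3])
--     if A == C or A == D or B == C or B == D:
--         return False
--     return (ccw(A,C,D) != ccw(B,C,D)) and (ccw(A,B,C) != ccw(A,B,D))
--
-- def crosses_any(new_seg, all_segs):
--     for seg in all_segs:
--         if segments_cross(new_seg, seg):
--             return True
--     return False
--
-- def knight_legal_moves(pos, visited, all_segs):
--     moves = []
--     for dr, dc in KNIGHT_MOVES:
--         nr, nc = pos[0]+dr, pos[1]+dc
--         if not is_valid_square(nr, nc):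
--             continue
--         if (nr, nc) in visited:
--             continue
--         new_seg = (pos[0], pos[1], nr, nc)
--         if crosses_any(new_seg, all_segs):
--             continue
--         moves.append((nr, nc))
--     return moves
--
-- def heuristic_lookahead3(pos, visited, all_segs):
--     moves = knight_legal_moves(pos, visited, all_segs)
--     if not moves:
--         return None
--     best_move = moves[0]
--     best_score = -1
--     for m1 in moves:
--         v1 = visited | {m1}
--         s1 = all_segs + [(pos[0], pos[1], m1[0], m1[1])]
--         moves2 = knight_legal_moves(m1, v1, s1)
--         if not moves2:
--             score = 0
--         else:
--             # For each second move, look for third ply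
--             min_third_ply = float('inf')
--             for m2 in moves2:
--                 v2 = v1 | {m2}
--                 s2 = s1 + [(m1[0], m1[1], m2[0], m2[1])]
--                 moves3 = knight_legal_moves(m2, v2, s2)
--                 third_ply_score = len(moves3)
--                 if third_ply_score < min_third_ply:
--                     min_third_ply = third_ply_score
--             score = min_third_ply
--         if score > best_score:
--             best_score = score
--             best_move = m1
--     return best_move
-- ===== SOURCE B (Python) =====
-- BOARD_SIZE = 8
--
-- KNIGHT_MOVES = [
--     (1, 2), (2, 1), (-1, 2), (-2, 1),
--     (1, -2), (2, -1), (-1, -2), (-2, -1)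
-- ]
--
-- def _ccw(A, B, C):
--     return (C[1]-A[1])*(B[0]-A[0]) > (B[1]-A[1])*(C[0]-A[0])
--
-- def _segments_cross(seg1, seg2):
--     A, B = (seg1[0], seg1[1]), (seg1[2], seg1[3])
--     C, D = (seg2[0], seg2[1]), (seg2[2], seg2[3])
--     if A == C or A == D or B == C or B == D:
--         return False
--     return (_ccw(A, C, D) != _ccw(B, C, D)) and (_ccw(A, B, C) != _ccw(A, B, D))
--
-- def _legal_moves(pos, visited, segs):
--     r, c = pos
--     return [(r + dr, c + dc) for dr, dc in KNIGHT_MOVES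
--             if 0 <= r + dr < BOARD_SIZE and 0 <= c + dc < BOARD_SIZE
--             and (r + dr, c + dc) not in visited
--             and not any(_segments_cross((r, c, r + dr, c + dc), s) for s in segs)]
--
-- def _search(pos, visited, segs, depth):
--     # depth-limited minimax value: mobility count at the leaf, min over children above it
--     moves = _legal_moves(pos, visited, segs)
--     if depth == 0:
--         return len(moves)
--     if not moves:
--         return 0
--     return min(_search(m, visited | {m}, segs + [(pos[0], pos[1], m[0], m[1])], depth - 1)
--                for m in moves)
--
-- def heuristic_lookahead3(pos, visited, all_segs):
--     moves = _legal_moves(pos, visited, all_segs)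
--     if not moves:
--         return None
--     return max(moves, key=lambda m: _search(m, visited | {m},
--                all_segs + [(pos[0], pos[1], m[0], m[1])], 1))
-- ===== Notes on version B (the rewrite author's own statement) =====
-- stated objective: simpler
-- what changed: Replaces A's three hand-rolled nested loops with manual best/min accumulators by a uniform recursive depth-limited search helper plus a list-comprehension move generator and a single max-with-key call.
import Mathlib
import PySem

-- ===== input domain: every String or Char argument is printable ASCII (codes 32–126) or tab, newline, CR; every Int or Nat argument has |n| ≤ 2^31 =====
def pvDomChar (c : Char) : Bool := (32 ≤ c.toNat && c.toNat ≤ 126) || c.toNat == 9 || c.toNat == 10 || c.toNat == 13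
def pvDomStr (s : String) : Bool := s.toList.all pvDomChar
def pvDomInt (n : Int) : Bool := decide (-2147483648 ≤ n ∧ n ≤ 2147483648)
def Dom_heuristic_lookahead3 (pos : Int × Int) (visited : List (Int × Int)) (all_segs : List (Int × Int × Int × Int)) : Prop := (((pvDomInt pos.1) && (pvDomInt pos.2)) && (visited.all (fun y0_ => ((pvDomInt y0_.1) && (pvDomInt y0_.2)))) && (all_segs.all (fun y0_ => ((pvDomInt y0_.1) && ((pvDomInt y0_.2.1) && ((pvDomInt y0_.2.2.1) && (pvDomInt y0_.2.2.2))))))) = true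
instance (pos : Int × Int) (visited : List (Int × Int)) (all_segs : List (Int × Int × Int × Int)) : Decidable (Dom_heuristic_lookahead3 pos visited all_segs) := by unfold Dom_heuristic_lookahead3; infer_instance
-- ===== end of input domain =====

-- B replaces A's three hand-rolled nested loops by a uniform depth-limited recursive search plus
-- max-with-key / list-comprehension decomposition (objective: simpler); same return value everywhere.

-- shared module constants / geometric helpers (identical text in both Pythons)
def pvKnightMoves : List (Int × Int) :=
  [(1, 2), (2, 1), (-1, 2), (-2, 1), (1, -2), (2, -1), (-1, -2), (-2, -1)]

def pvCcw (A B C : Int × Int) : Bool :=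
  decide ((C.2 - A.2) * (B.1 - A.1) > (B.2 - A.2) * (C.1 - A.1))

def pvSegmentsCross (seg1 seg2 : Int × Int × Int × Int) : Bool :=
  let A := (seg1.1, seg1.2.1); let B := (seg1.2.2.1, seg1.2.2.2)
  let C := (seg2.1, seg2.2.1); let D := (seg2.2.2.1, seg2.2.2.2)
  if A = C ∨ A = D ∨ B = C ∨ B = D then false
  else (pvCcw A C D != pvCcw B C D) && (pvCcw A B C != pvCcw A B D)

def pvIsValidSquare (r c : Int) : Bool :=
  decide (0 ≤ r ∧ r < 8) && decide (0 ≤ c ∧ c < 8)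

-- ===== PORT A =====
-- crosses_any: loop with early return True
def pvCrossesAnyA (new_seg : Int × Int × Int × Int) : List (Int × Int × Int × Int) → Bool
  | [] => false
  | seg :: rest => if pvSegmentsCross new_seg seg then true else pvCrossesAnyA new_seg rest

-- knight_legal_moves: loop over KNIGHT_MOVES with continue-guards, appending to moves
def pvLegalA (pos : Int × Int) (visited : List (Int × Int)) (all_segs : List (Int × Int × Int × Int)) : List (Int × Int) :=
  pvKnightMoves.foldl (fun moves dd =>
    let nr := pos.1 + dd.1
    let nc := pos.2 + dd.2
    if ¬ (pvIsValidSquare nr nc) then moves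
    else if visited.contains (nr, nc) then moves
    else if pvCrossesAnyA (pos.1, pos.2, nr, nc) all_segs then moves
    else moves ++ [(nr, nc)]) []

def heuristic_lookahead3 (pos : Int × Int) (visited : List (Int × Int)) (all_segs : List (Int × Int × Int × Int)) : Option (Int × Int) :=
  let moves := pvLegalA pos visited all_segs
  match moves with
  | [] => none
  | m0 :: rest =>
    -- best_move = moves[0], best_score = -1; for m1 in moves: …
    let final := (m0 :: rest).foldl (fun (best : (Int × Int) × Int) m1 =>
      let v1 := PySem.Set.add visited m1
      let s1 := all_segs ++ [(pos.1, pos.2, m1.1, m1.2)]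
      let moves2 := pvLegalA m1 v1 s1
      let score : Int :=
        if moves2 = [] then 0
        else
          -- min_third_ply = float('inf') modelled as none; moves2 ≠ [] so the loop sets it
          let mi := moves2.foldl (fun (cur : Option Int) m2 =>
            let v2 := PySem.Set.add v1 m2
            let s2 := s1 ++ [(m1.1, m1.2, m2.1, m2.2)]
            let third : Int := ((pvLegalA m2 v2 s2).length : Int)
            match cur with
            | none => some third
            | some c => if third < c then some third else some c) none
          mi.getD 0   -- getD unreachable: moves2 ≠ []
      if best.2 < score then (m1, score) else best) (m0, -1)
    some final.1

-- ===== PORT B =====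
-- _legal_moves: list comprehension with an any(…) generator
def pvLegalB (pos : Int × Int) (visited : List (Int × Int)) (segs : List (Int × Int × Int × Int)) : List (Int × Int) :=
  pvKnightMoves.filterMap (fun dd =>
    let nr := pos.1 + dd.1
    let nc := pos.2 + dd.2
    if pvIsValidSquare nr nc && !(visited.contains (nr, nc))
        && !(segs.any (fun s => pvSegmentsCross (pos.1, pos.2, nr, nc) s))
    then some (nr, nc) else none)

-- _search: uniform depth-limited recursion (leaf = mobility count, inner node = min over children)
def pvSearch (pos : Int × Int) (visited : List (Int × Int)) (segs : List (Int × Int × Int × Int)) : Nat → Int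
  | 0 => ((pvLegalB pos visited segs).length : Int)
  | d + 1 =>
    let moves := pvLegalB pos visited segs
    if moves = [] then 0
    else
      (PySem.List.min?
        (moves.map (fun m => pvSearch m (PySem.Set.add visited m) (segs ++ [(pos.1, pos.2, m.1, m.2)]) d))
        (fun x => x)).getD 0   -- getD unreachable: moves ≠ []

def heuristic_lookahead3_alt (pos : Int × Int) (visited : List (Int × Int)) (all_segs : List (Int × Int × Int × Int)) : Option (Int × Int) :=
  let moves := pvLegalB pos visited all_segs
  if moves = [] then none
  else PySem.List.max? moves
    (fun m => pvSearch m (PySem.Set.add visited m) (all_segs ++ [(pos.1, pos.2, m.1, m.2)]) 1)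

-- ===== PRECONDITION & SPEC =====
def Spec_heuristic_lookahead3 (pos : Int × Int) (visited : List (Int × Int)) (all_segs : List (Int × Int × Int × Int)) (out : Option (Int × Int)) : Prop := out = heuristic_lookahead3_alt pos visited all_segs
instance (pos : Int × Int) (visited : List (Int × Int)) (all_segs : List (Int × Int × Int × Int)) (out : Option (Int × Int)) : Decidable (Spec_heuristic_lookahead3 pos visited all_segs out) := by unfold Spec_heuristic_lookahead3; infer_instance

-- ===== CLAIM (what is proved, stated in full; the proofs are below) =====
def Claim_equal_heuristic_lookahead3 : Prop := ∀ (pos : Int × Int) (visited : List (Int × Int)) (all_segs : List (Int × Int × Int × Int)), Dom_heuristic_lookahead3 pos visited all_segs → Spec_heuristic_lookahead3 pos visited all_segs (heuristic_lookahead3 pos visited all_segs)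

-- ===== LEMMAS AND PROOFS =====

lemma crossesAnyA_eq_any (ns : Int × Int × Int × Int) (segs : List (Int × Int × Int × Int)) :
    pvCrossesAnyA ns segs = segs.any (fun s => pvSegmentsCross ns s) := by
  induction segs with
  | nil => rfl
  | cons s rest ih =>
    by_cases h : pvSegmentsCross ns s = true <;> simp [pvCrossesAnyA, h, ih]

lemma filterMap_if_eq_map_filter {a b : Type} (p : a -> Bool) (f : a -> b) (l : List a) :
    l.filterMap (fun x => if p x then some (f x) else none) = List.map f (l.filter p) := by
  induction l with
  | nil => rfl
  | cons x t ih =>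
    by_cases h : p x = true <;> simp [h, ih]

lemma legalA_eq_legalB (pos : Int × Int) (visited : List (Int × Int)) (segs : List (Int × Int × Int × Int)) :
    pvLegalA pos visited segs = pvLegalB pos visited segs := by
  unfold pvLegalA pvLegalB
  have hstep : (fun (moves : List (Int × Int)) (dd : Int × Int) =>
      let nr := pos.1 + dd.1
      let nc := pos.2 + dd.2
      if ¬ (pvIsValidSquare nr nc) then moves
      else if visited.contains (nr, nc) then moves
      else if pvCrossesAnyA (pos.1, pos.2, nr, nc) segs then moves
      else moves ++ [(nr, nc)])
      = (fun moves dd =>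
        if (pvIsValidSquare (pos.1 + dd.1) (pos.2 + dd.2)
            && !(visited.contains (pos.1 + dd.1, pos.2 + dd.2))
            && !(segs.any (fun s => pvSegmentsCross (pos.1, pos.2, pos.1 + dd.1, pos.2 + dd.2) s)))
        then moves ++ [(pos.1 + dd.1, pos.2 + dd.2)] else moves) := by
    funext moves dd
    rw [show segs.any (fun s => pvSegmentsCross (pos.1, pos.2, pos.1 + dd.1, pos.2 + dd.2) s)
        = pvCrossesAnyA (pos.1, pos.2, pos.1 + dd.1, pos.2 + dd.2) segs from
      (crossesAnyA_eq_any _ _).symm]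
    by_cases h1 : pvIsValidSquare (pos.1 + dd.1) (pos.2 + dd.2) = true
    . by_cases h2 : (pos.1 + dd.1, pos.2 + dd.2) ∈ visited
      . simp [h1, h2]
      . by_cases h3 : pvCrossesAnyA (pos.1, pos.2, pos.1 + dd.1, pos.2 + dd.2) segs = true
          <;> simp [h1, h2, h3]
    . simp [h1]
  rw [hstep, PySem.List.foldl_append_if
    (fun dd => pvIsValidSquare (pos.1 + dd.1) (pos.2 + dd.2)
        && !(visited.contains (pos.1 + dd.1, pos.2 + dd.2))
        && !(segs.any (fun s => pvSegmentsCross (pos.1, pos.2, pos.1 + dd.1, pos.2 + dd.2) s)))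
    (fun dd => (pos.1 + dd.1, pos.2 + dd.2)) pvKnightMoves []]
  rw [filterMap_if_eq_map_filter]
  simp

lemma pvSearch_zero (pos : Int × Int) (visited : List (Int × Int)) (segs : List (Int × Int × Int × Int)) :
    pvSearch pos visited segs 0 = ((pvLegalB pos visited segs).length : Int) := rfl

lemma pvSearch_one (pos : Int × Int) (visited : List (Int × Int)) (segs : List (Int × Int × Int × Int)) :
    pvSearch pos visited segs 1 =
      (let moves := pvLegalB pos visited segs
       if moves = [] then 0
       else
         (PySem.List.min?
           (moves.map (fun m => pvSearch m (PySem.Set.add visited m) (segs ++ [(pos.1, pos.2, m.1, m.2)]) 0))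
           (fun x => x)).getD 0) := rfl

-- A's loop 'update best on strict improvement', once it carries a (move, its score) state,
-- is exactly max?'s fold
lemma strict_improve_foldl_eq_max (key : (Int × Int) -> Int) :
    forall (t : List (Int × Int)) (b : Int × Int),
      t.foldl (fun (acc : Option (Int × Int)) x =>
          match acc with
          | none => some x
          | some m => if key m < key x then some x else some m) (some b)
      = some (t.foldl (fun (best : (Int × Int) × Int) m1 =>
          if best.2 < key m1 then (m1, key m1) else best) (b, key b)).1 := by
  intro t
  induction t with
  | nil => intro b; rfl
  | cons m t ih =>
    intro b
    simp only [List.foldl_cons]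
    by_cases h : key b < key m
    . simpa [h] using ih m
    . simpa [h] using ih b

-- A's inner Option-min loop is min? of the mapped values
lemma option_min_foldl_eq_min? (f : (Int × Int) -> Int) (l : List (Int × Int)) :
    l.foldl (fun (cur : Option Int) m2 =>
        match cur with
        | none => some (f m2)
        | some c => if f m2 < c then some (f m2) else some c) none
    = PySem.List.min? (l.map f) (fun x => x) := by
  unfold PySem.List.min?
  rw [List.foldl_map]
  congr 1
  funext cur m2
  cases cur <;> rfl

lemma min?_getD_nonneg (l : List Int) (h : forall x, x ∈ l -> 0 ≤ x) :
    0 ≤ (PySem.List.min? l (fun x => x)).getD 0 := by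
  cases hm : PySem.List.min? l (fun x => x) with
  | none => simp
  | some m => simpa using h m (PySem.List.min?_mem hm)

-- A's inline score for a first move m1 equals B's depth-1 search value
lemma scoreA_eq_search (pos : Int × Int) (visited : List (Int × Int))
    (all_segs : List (Int × Int × Int × Int)) (m1 : Int × Int) :
    (let v1 := PySem.Set.add visited m1
     let s1 := all_segs ++ [(pos.1, pos.2, m1.1, m1.2)]
     let moves2 := pvLegalA m1 v1 s1
     if moves2 = [] then (0 : Int)
     else
       (moves2.foldl (fun (cur : Option Int) m2 =>
          let v2 := PySem.Set.add v1 m2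
          let s2 := s1 ++ [(m1.1, m1.2, m2.1, m2.2)]
          let third : Int := ((pvLegalA m2 v2 s2).length : Int)
          match cur with
          | none => some third
          | some c => if third < c then some third else some c) none).getD 0)
    = pvSearch m1 (PySem.Set.add visited m1) (all_segs ++ [(pos.1, pos.2, m1.1, m1.2)]) 1 := by
  rw [pvSearch_one]
  simp only [legalA_eq_legalB]
  rw [option_min_foldl_eq_min?
    (fun m2 => ((pvLegalB m2 (PySem.Set.add (PySem.Set.add visited m1) m2)
      ((all_segs ++ [(pos.1, pos.2, m1.1, m1.2)]) ++ [(m1.1, m1.2, m2.1, m2.2)])).length : Int))]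
  simp only [pvSearch_zero]

lemma search1_nonneg (pos : Int × Int) (visited : List (Int × Int))
    (segs : List (Int × Int × Int × Int)) :
    0 ≤ pvSearch pos visited segs 1 := by
  rw [pvSearch_one]
  simp only []
  split
  . omega
  . apply min?_getD_nonneg
    intro x hx
    simp only [List.mem_map] at hx
    obtain ⟨m, _, rfl⟩ := hx
    rw [pvSearch_zero]
    positivity

-- ===== VERDICT (by name: the statement is the Claim_ definition above) =====
theorem heuristic_lookahead3_spec : Claim_equal_heuristic_lookahead3 := by
  intro pos visited all_segs _
  unfold Spec_heuristic_lookahead3 heuristic_lookahead3 heuristic_lookahead3_alt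
  rw [legalA_eq_legalB]
  cases hm : pvLegalB pos visited all_segs with
  | nil => simp
  | cons m0 rest =>
    simp only [reduceCtorEq, if_false]
    have hbody : forall (best : (Int × Int) × Int) (m1 : Int × Int),
        (let v1 := PySem.Set.add visited m1
         let s1 := all_segs ++ [(pos.1, pos.2, m1.1, m1.2)]
         let moves2 := pvLegalA m1 v1 s1
         let score : Int :=
           if moves2 = [] then 0
           else
             (moves2.foldl (fun (cur : Option Int) m2 =>
               let v2 := PySem.Set.add v1 m2
               let s2 := s1 ++ [(m1.1, m1.2, m2.1, m2.2)]
               let third : Int := ((pvLegalA m2 v2 s2).length : Int)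
               match cur with
               | none => some third
               | some c => if third < c then some third else some c) none).getD 0
         if best.2 < score then (m1, score) else best)
        = if best.2 < pvSearch m1 (PySem.Set.add visited m1) (all_segs ++ [(pos.1, pos.2, m1.1, m1.2)]) 1
          then (m1, pvSearch m1 (PySem.Set.add visited m1) (all_segs ++ [(pos.1, pos.2, m1.1, m1.2)]) 1)
          else best := by
      intro best m1
      have h := scoreA_eq_search pos visited all_segs m1
      simp only at h ⊢
      rw [h]
    simp only [hbody]
    have h0 : 0 ≤ pvSearch m0 (PySem.Set.add visited m0) (all_segs ++ [(pos.1, pos.2, m0.1, m0.2)]) 1 :=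
      search1_nonneg _ _ _
    have hfirst : (if (-1 : Int) < pvSearch m0 (PySem.Set.add visited m0) (all_segs ++ [(pos.1, pos.2, m0.1, m0.2)]) 1
        then (m0, pvSearch m0 (PySem.Set.add visited m0) (all_segs ++ [(pos.1, pos.2, m0.1, m0.2)]) 1)
        else (m0, (-1 : Int)))
        = (m0, pvSearch m0 (PySem.Set.add visited m0) (all_segs ++ [(pos.1, pos.2, m0.1, m0.2)]) 1) := by
      rw [if_pos (by omega)]
    unfold PySem.List.max?
    simp only [List.foldl_cons, hfirst]
    have hfin := (strict_improve_foldl_eq_max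
      (fun m => pvSearch m (PySem.Set.add visited m) (all_segs ++ [(pos.1, pos.2, m.1, m.2)]) 1)
      rest m0).symm
    convert hfin using 2
    funext acc x
    cases acc <;> rfl
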